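-- pv_equiv track=rewrite | github.com/2016180202024/Hydrological-Signatures-Aware-Framework | utils/model/test_full.py | concat_columns
-- ===== SOURCE A (Python) =====
-- def concat_columns(columns1, columns2, columns3):
--     columns = []
--     for column1 in columns1:
--         for column2 in columns2:
--             for column3 in columns3:
--                 column = f"{column3}_{column2}_{column1}"
--                 columns.append(column)
--     return columns
-- ===== SOURCE B (Python) =====
-- def concat_columns(columns1, columns2, columns3):
--     # Rank-decoding: enumerate a single flat index over the product size and
--     # decode it arithmetically into the three component indices (mixed radix).
--     m, k = len(columns2), len(columns3)
--     total = len(columns1) * m * k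
--     return [
--         f"{columns3[i % k]}_{columns2[i // k % m]}_{columns1[i // (k * m)]}"
--         for i in range(total)
--     ]
-- ===== Notes on version B (the rewrite author's own statement) =====
-- stated objective: alternative
-- what changed: Replaces the three nested loops by a single flat pass over range(n*m*k) that decodes each flat index into the three component indices with mixed-radix divmod arithmetic.
import Mathlib
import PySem

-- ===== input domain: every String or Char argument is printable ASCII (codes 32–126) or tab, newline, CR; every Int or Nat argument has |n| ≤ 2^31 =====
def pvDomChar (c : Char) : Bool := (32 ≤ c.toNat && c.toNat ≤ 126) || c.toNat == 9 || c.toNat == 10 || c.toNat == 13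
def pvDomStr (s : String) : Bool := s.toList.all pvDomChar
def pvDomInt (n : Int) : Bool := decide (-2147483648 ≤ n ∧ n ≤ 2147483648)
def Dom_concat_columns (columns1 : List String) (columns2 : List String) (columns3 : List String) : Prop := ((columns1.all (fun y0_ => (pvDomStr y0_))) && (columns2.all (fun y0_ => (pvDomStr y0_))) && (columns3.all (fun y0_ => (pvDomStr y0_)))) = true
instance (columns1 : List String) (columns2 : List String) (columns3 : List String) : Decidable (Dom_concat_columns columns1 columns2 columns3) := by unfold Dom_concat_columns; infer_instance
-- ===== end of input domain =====

-- B replaces A's three nested accumulator loops by a single flat pass over range(n*m*k) that decodes each index with mixed-radix divmod arithmetic; alternative structure, same cost.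


-- ===== PORT A =====
-- Port of A: three nested loops with an accumulator list.
def concat_columns (columns1 : List String) (columns2 : List String) (columns3 : List String) : List String :=
  columns1.foldl (fun columns column1 =>
    columns2.foldl (fun columns column2 =>
      columns3.foldl (fun columns column3 =>
        columns ++ [column3 ++ "_" ++ column2 ++ "_" ++ column1]) columns) columns) []

-- ===== PORT B =====
-- Port of B: one flat pass over range (n*m*k), decoding each flat index by
-- mixed-radix divmod arithmetic. The decoded indices are always in range, so
-- Python's in-range indexing is ported exactly by getD (the default is never used);
-- Nat / and % agree with Python's // and % on these nonnegative values.
def concat_columns_alt (columns1 : List String) (columns2 : List String) (columns3 : List String) : List String :=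
  let m := columns2.length
  let k := columns3.length
  let total := columns1.length * m * k
  (List.range total).map (fun i =>
    (columns3.getD (i % k) "") ++ "_" ++ (columns2.getD (i / k % m) "") ++ "_"
      ++ (columns1.getD (i / (k * m)) ""))

-- ===== PRECONDITION & SPEC =====
def Spec_concat_columns (columns1 : List String) (columns2 : List String) (columns3 : List String) (out : List String) : Prop := out = concat_columns_alt columns1 columns2 columns3
instance (columns1 : List String) (columns2 : List String) (columns3 : List String) (out : List String) : Decidable (Spec_concat_columns columns1 columns2 columns3 out) := by unfold Spec_concat_columns; infer_instance

-- ===== CLAIM (what is proved, stated in full; the proofs are below) =====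
def Claim_equal_concat_columns : Prop := ∀ (columns1 : List String) (columns2 : List String) (columns3 : List String), Dom_concat_columns columns1 columns2 columns3 → Spec_concat_columns columns1 columns2 columns3 (concat_columns columns1 columns2 columns3)

-- ===== LEMMAS AND PROOFS =====

-- ===== VERDICT (by name: the statement is the Claim_ definition above) =====
-- mixed-radix block decomposition: mapping over range (|xs|*B) with index split i = (i/B, i%B)
-- equals flatMap over xs of a map over range B
theorem rangeMul_map {α β : Type} (d : α) (B : Nat) (xs : List α) (g : α → Nat → β) :
    (List.range (xs.length * B)).map (fun i => g (xs.getD (i / B) d) (i % B))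
      = xs.flatMap (fun x => (List.range B).map (fun j => g x j)) := by
  rcases Nat.eq_zero_or_pos B with hB | hB
  · simp [hB]
  induction xs with
  | nil => simp
  | cons a t ih =>
    have hlen : (a :: t).length * B = B + t.length * B := by
      simp [List.length_cons, Nat.succ_mul, Nat.add_comm]
    rw [hlen, List.range_add, List.map_append, List.map_map, List.flatMap_cons]
    congr 1
    · apply List.map_congr_left
      intro i hi
      have hi' : i < B := List.mem_range.mp hi
      simp [Nat.div_eq_of_lt hi', Nat.mod_eq_of_lt hi']
    · rw [← ih]
      apply List.map_congr_left
      intro j _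
      have h1 : (B + j) / B = j / B + 1 := by
        rw [Nat.add_comm, Nat.add_div_right _ hB]
      have h2 : (B + j) % B = j % B := Nat.add_mod_left B j
      simp [Function.comp, h1, h2]

theorem range_map_getD {α β : Type} (d : α) (xs : List α) (f : α → β) :
    (List.range xs.length).map (fun j => f (xs.getD j d)) = xs.map f := by
  induction xs with
  | nil => simp
  | cons a t ih =>
    rw [List.length_cons, List.range_succ_eq_map, List.map_cons, List.map_map, List.map_cons,
      List.getD_cons_zero]
    congr 1

-- layer 2 of A: the columns2 loop appends one block per c2
theorem concat_columns_loop2 (c1 : String) (columns2 columns3 : List String) (acc : List String) :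
    columns2.foldl (fun columns column2 =>
        columns3.foldl (fun columns column3 =>
          columns ++ [column3 ++ "_" ++ column2 ++ "_" ++ c1]) columns) acc =
      acc ++ columns2.flatMap (fun column2 =>
        columns3.map (fun column3 => column3 ++ "_" ++ column2 ++ "_" ++ c1)) := by
  induction columns2 generalizing acc with
  | nil => simp
  | cons c2 t2 ih =>
    simp only [List.foldl_cons, List.flatMap_cons]
    rw [PySem.List.foldl_append_singleton_eq_map, ih, List.append_assoc]

-- A as one nested flatMap
theorem concat_columns_eq_flatMap (columns1 columns2 columns3 : List String) :
    concat_columns columns1 columns2 columns3 =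
      columns1.flatMap (fun column1 => columns2.flatMap (fun column2 =>
        columns3.map (fun column3 => column3 ++ "_" ++ column2 ++ "_" ++ column1))) := by
  unfold concat_columns
  suffices h : ∀ acc : List String,
      columns1.foldl (fun columns column1 =>
        columns2.foldl (fun columns column2 =>
          columns3.foldl (fun columns column3 =>
            columns ++ [column3 ++ "_" ++ column2 ++ "_" ++ column1]) columns) columns) acc =
      acc ++ columns1.flatMap (fun column1 => columns2.flatMap (fun column2 =>
        columns3.map (fun column3 => column3 ++ "_" ++ column2 ++ "_" ++ column1))) by
    simpa using h []
  induction columns1 with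
  | nil => simp
  | cons c1 t1 ih =>
    intro acc
    simp only [List.foldl_cons, List.flatMap_cons]
    rw [concat_columns_loop2, ih, List.append_assoc]

-- B as the same nested flatMap, via two applications of rangeMul_map
theorem concat_columns_alt_eq_flatMap (c1 c2 c3 : List String) :
    concat_columns_alt c1 c2 c3 =
      c1.flatMap (fun x1 => c2.flatMap (fun x2 =>
        c3.map (fun x3 => x3 ++ "_" ++ x2 ++ "_" ++ x1))) := by
  show (List.range (c1.length * c2.length * c3.length)).map (fun i =>
      (c3.getD (i % c3.length) "") ++ "_" ++ (c2.getD (i / c3.length % c2.length) "") ++ "_"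
        ++ (c1.getD (i / (c3.length * c2.length)) "")) = _
  rw [show c1.length * c2.length * c3.length = c1.length * (c3.length * c2.length) from by ring]
  have hpt : ∀ i ∈ List.range (c1.length * (c3.length * c2.length)),
      (c3.getD (i % c3.length) "") ++ "_" ++ (c2.getD (i / c3.length % c2.length) "") ++ "_"
        ++ (c1.getD (i / (c3.length * c2.length)) "")
      = (c3.getD (i % (c3.length * c2.length) % c3.length) "") ++ "_"
        ++ (c2.getD (i % (c3.length * c2.length) / c3.length) "") ++ "_"
        ++ (c1.getD (i / (c3.length * c2.length)) "") := by
    intro i _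
    rw [Nat.mod_mod_of_dvd i ⟨c2.length, rfl⟩, Nat.mod_mul_right_div_self]
  rw [List.map_congr_left hpt]
  have h2 : (List.range (c1.length * (c3.length * c2.length))).map (fun i =>
        (c3.getD (i % (c3.length * c2.length) % c3.length) "") ++ "_"
          ++ (c2.getD (i % (c3.length * c2.length) / c3.length) "") ++ "_"
          ++ (c1.getD (i / (c3.length * c2.length)) ""))
      = c1.flatMap (fun x1 => (List.range (c3.length * c2.length)).map (fun r =>
          (c3.getD (r % c3.length) "") ++ "_" ++ (c2.getD (r / c3.length) "") ++ "_" ++ x1)) :=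
    rangeMul_map "" (c3.length * c2.length) c1
      (fun x1 r => (c3.getD (r % c3.length) "") ++ "_" ++ (c2.getD (r / c3.length) "") ++ "_" ++ x1)
  rw [h2]
  apply List.flatMap_congr
  intro x1 _
  rw [show c3.length * c2.length = c2.length * c3.length from Nat.mul_comm _ _]
  have h3 : (List.range (c2.length * c3.length)).map (fun r =>
        (c3.getD (r % c3.length) "") ++ "_" ++ (c2.getD (r / c3.length) "") ++ "_" ++ x1)
      = c2.flatMap (fun x2 => (List.range c3.length).map (fun j =>
          (c3.getD j "") ++ "_" ++ x2 ++ "_" ++ x1)) :=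
    rangeMul_map "" c3.length c2 (fun x2 j => (c3.getD j "") ++ "_" ++ x2 ++ "_" ++ x1)
  rw [h3]
  apply List.flatMap_congr
  intro x2 _
  exact range_map_getD "" c3 (fun x3 => x3 ++ "_" ++ x2 ++ "_" ++ x1)

theorem concat_columns_spec : Claim_equal_concat_columns := by
  intro columns1 columns2 columns3 _
  unfold Spec_concat_columns
  rw [concat_columns_eq_flatMap, concat_columns_alt_eq_flatMap]
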